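-- pv_equiv track=rewrite | github.com/FuratMAlsmadi/AlgoNinga | Chapter_4/Reinforcement/R_4.8.py | sum_isabel
-- ===== SOURCE A (Python) =====
-- def sum_isabel(nums_list):
--     if len(nums_list) == 1:
--         return nums_list[0]
--     else:
--         sum_list = [0]*(len(nums_list)//2)
--         for i in range(0,len(nums_list)//2):
--             sum_list[i] = nums_list[2*i] + nums_list[2*i+1]
--         return sum_isabel(sum_list)
-- ===== SOURCE B (Python) =====
-- def sum_isabel(nums_list):
--     cur = nums_list
--     while len(cur) > 1:
--         nxt = []
--         it = iter(cur)
--         for x, y in zip(it, it):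
--             nxt.append(x + y)
--         cur = nxt
--     return cur[0]
-- ===== Notes on version B (the rewrite author's own statement) =====
-- stated objective: alternative
-- what changed: Replaces A's recursion with an index-preallocated list by an iterative while-loop that consumes the current level two elements at a time via a paired iterator (zip(it, it)), keeping the identical left-to-right pairwise grouping.
-- outside the precondition, e.g. on sum_isabel([]): A raises RecursionError, B raises IndexError
import Mathlib
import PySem

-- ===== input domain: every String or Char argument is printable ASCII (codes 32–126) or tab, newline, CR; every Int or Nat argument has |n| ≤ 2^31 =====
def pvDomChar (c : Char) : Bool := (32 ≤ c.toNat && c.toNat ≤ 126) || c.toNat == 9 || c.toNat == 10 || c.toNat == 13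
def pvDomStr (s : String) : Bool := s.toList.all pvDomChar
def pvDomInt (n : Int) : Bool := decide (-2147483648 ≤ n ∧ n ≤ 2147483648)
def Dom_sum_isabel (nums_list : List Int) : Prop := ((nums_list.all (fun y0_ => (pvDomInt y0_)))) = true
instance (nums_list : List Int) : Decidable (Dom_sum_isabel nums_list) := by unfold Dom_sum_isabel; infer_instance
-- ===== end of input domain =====

-- B is an iterative while-loop that pairs up each level with a two-at-a-time iterator,
-- instead of A's recursion writing into an index-preallocated list; return values agree
-- on every nonempty list (on [] both Pythons raise).

-- ===== PORT A =====
-- sum_list = [0]*(len//2); for i in range(0, len//2): sum_list[i] = nums[2*i] + nums[2*i+1]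
def buildA (l : List Int) : List Int :=
  (PySem.List.pyRange 0 ((l.length / 2 : Nat) : Int) 1).foldl
    (fun acc i =>
      acc.set i.toNat ((PySem.List.pyGet? l (2 * i)).getD 0 + (PySem.List.pyGet? l (2 * i + 1)).getD 0))
    (List.replicate (l.length / 2) 0)

-- length of the foldl-of-set loop (needed by sum_isabel's termination proof)
theorem foldl_set_len (g : Int → Int) (is : List Int) (acc : List Int) :
    (is.foldl (fun a i => a.set i.toNat (g i)) acc).length = acc.length := by
  induction is generalizing acc with
  | nil => rfl
  | cons i rest ih => simp [List.foldl_cons, ih]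

theorem buildA_length (l : List Int) : (buildA l).length = l.length / 2 := by
  unfold buildA
  rw [foldl_set_len (fun i => (PySem.List.pyGet? l (2 * i)).getD 0 + (PySem.List.pyGet? l (2 * i + 1)).getD 0)]
  simp

def sum_isabel (nums_list : List Int) : Int :=
  if nums_list.length = 1 then (PySem.List.pyGet? nums_list 0).getD 0
  else if nums_list.length = 0 then 0  -- totality guard: Python A recurses forever on [] (outside Pre_)
  else sum_isabel (buildA nums_list)
termination_by nums_list.length
decreasing_by simp only [buildA_length]; omega

-- ===== PORT B =====
-- for x, y in zip(it, it): nxt.append(x + y)   (consume two at a time, drop a trailing odd element)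
def pairStep : List Int → List Int
  | [] => []
  | [_] => []
  | x :: y :: rest => (x + y) :: pairStep rest

theorem pairStep_length (l : List Int) : (pairStep l).length = l.length / 2 := by
  induction l using pairStep.induct with
  | case1 => rfl
  | case2 => simp [pairStep]
  | case3 x y rest ih => simp [pairStep, ih]; omega

-- while len(cur) > 1: cur = pairStep cur; return cur[0]
def sumLoop (cur : List Int) : Int :=
  if cur.length > 1 then sumLoop (pairStep cur)
  else (PySem.List.pyGet? cur 0).getD 0
termination_by cur.length
decreasing_by simp only [pairStep_length]; omega

def sum_isabel_alt (nums_list : List Int) : Int := sumLoop nums_list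

-- ===== PRECONDITION & SPEC =====
-- Pre_ excludes only the empty list, on which Python A raises RecursionError (infinite recursion).
def Pre_sum_isabel (nums_list : List Int) : Prop := nums_list ≠ []
instance (nums_list : List Int) : Decidable (Pre_sum_isabel nums_list) := by unfold Pre_sum_isabel; infer_instance
def pvWitness_sum_isabel : List Int := ([1, 2, 3])

def Spec_sum_isabel (nums_list : List Int) (out : Int) : Prop := out = sum_isabel_alt nums_list
instance (nums_list : List Int) (out : Int) : Decidable (Spec_sum_isabel nums_list out) := by unfold Spec_sum_isabel; infer_instance

-- ===== CLAIM (what is proved, stated in full; the proofs are below) =====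
def Claim_equal_sum_isabel : Prop := ∀ (nums_list : List Int), Dom_sum_isabel nums_list → Pre_sum_isabel nums_list → Spec_sum_isabel nums_list (sum_isabel nums_list)

-- ===== LEMMAS AND PROOFS =====

-- A's index-writing loop computes [g 0, g 1, …, g (n-1)] followed by the untouched tail.
theorem foldl_set_range (g : Int → Int) :
    ∀ (n : Nat) (acc : List Int), n ≤ acc.length →
      (PySem.List.pyRange 0 (n : Int) 1).foldl (fun a i => a.set i.toNat (g i)) acc
        = (List.range n).map (fun (j : Nat) => g (j : Int)) ++ acc.drop n := by
  intro n
  induction n with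
  | zero => intro acc _; simp [PySem.List.pyRange_one_eq_nil]
  | succ n ih =>
    intro acc hn
    have h1 : ((n + 1 : Nat) : Int) = (n : Int) + 1 := by push_cast; ring
    rw [h1, PySem.List.pyRange_one_succ_right (by positivity), List.foldl_append, ih acc (by omega)]
    simp only [List.foldl_cons, List.foldl_nil, Int.toNat_natCast]
    rw [List.drop_eq_getElem_cons (show n < acc.length by omega), List.range_succ, List.map_append,
        List.set_append, List.append_assoc]
    simp
    rw [List.drop_eq_getElem_cons (show n < acc.length by omega), List.set_cons_zero]

theorem pairStep_getElem? (l : List Int) (i : Nat) :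
    (pairStep l)[i]? = Option.bind l[2 * i]? (fun a => Option.map (fun b => a + b) l[2 * i + 1]?) := by
  induction l using pairStep.induct generalizing i with
  | case1 => simp [pairStep]
  | case2 x =>
    cases i with
    | zero => simp [pairStep]
    | succ j => simp [pairStep]
  | case3 x y rest ih =>
    cases i with
    | zero => simp [pairStep]
    | succ j =>
      have h2 : 2 * (j + 1) = 2 * j + 1 + 1 := by omega
      simp [pairStep, ih, h2]

theorem buildA_eq_pairStep (l : List Int) : buildA l = pairStep l := by
  unfold buildA
  rw [foldl_set_range _ (l.length / 2) (List.replicate (l.length / 2) 0) (by simp)]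
  apply List.ext_getElem?
  intro i
  rw [pairStep_getElem?]
  by_cases hi : i < l.length / 2
  · have h1 : 2 * i < l.length := by omega
    have h2 : 2 * i + 1 < l.length := by omega
    have e1 : (2 : Int) * (i : Int) = ((2 * i : Nat) : Int) := by push_cast; ring
    have e2 : (2 : Int) * (i : Int) + 1 = ((2 * i + 1 : Nat) : Int) := by push_cast; ring
    rw [List.getElem?_append_left (by simpa using hi)]
    simp only [List.getElem?_map, List.getElem?_range, hi, Option.map_some, e1,
      PySem.List.pyGet?_natCast, List.getElem?_eq_getElem h1, List.getElem?_eq_getElem h2]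
    rw [show ((2 * i : Nat) : Int) + 1 = ((2 * i + 1 : Nat) : Int) by push_cast; ring,
      PySem.List.pyGet?_natCast, List.getElem?_eq_getElem h2]
    simp
  · have h2 : l.length ≤ 2 * i + 1 := by omega
    have hlen : ((List.range (l.length / 2)).map
        (fun j => (PySem.List.pyGet? l (2 * (j : Int))).getD 0 +
          (PySem.List.pyGet? l (2 * (j : Int) + 1)).getD 0)).length = l.length / 2 := by simp
    rw [List.getElem?_append_right (by simp; omega)]
    simp [List.getElem?_eq_none (by omega : l.length ≤ 2 * i + 1)]

theorem key : ∀ (n : Nat) (l : List Int), l.length = n → l ≠ [] → sum_isabel l = sumLoop l := by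
  intro n
  induction n using Nat.strong_induction_on with
  | _ n ih =>
    intro l hlen hne
    by_cases h1 : l.length = 1
    · rw [sum_isabel, sumLoop]
      simp [h1]
    · have h0 : l.length ≠ 0 := by simpa using hne
      have h2 : 2 ≤ l.length := by omega
      rw [sum_isabel, sumLoop]
      simp only [h1, if_false, h0, if_false, show l.length > 1 by omega, if_true]
      rw [buildA_eq_pairStep]
      have hps : (pairStep l).length = l.length / 2 := pairStep_length l
      exact ih (l.length / 2) (by omega) (pairStep l) (by omega)
        (by intro h; rw [h] at hps; simp at hps; omega)

-- ===== VERDICT (by name: the statement is the Claim_ definition above) =====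
theorem sum_isabel_spec : Claim_equal_sum_isabel := by
  intro l _ hpre
  unfold Spec_sum_isabel sum_isabel_alt
  exact key l.length l rfl hpre
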